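-- pv_equiv track=rewrite | github.com/Nic30/pyDigitalWaveTools | pyDigitalWaveTools/vcd/writer.py | bitVectorToStr
-- ===== SOURCE A (Python) =====
-- def bitVectorToStr(sig, val, width, vld_mask):
--     buff = []
--     for i in range(width - 1, -1, -1):
--         mask = (1 << i)
--         b = val & mask
--
--         if vld_mask & mask:
--             s = "1" if b else "0"
--         else:
--             s = "X"
--         buff.append(s)
--
--     return ''.join(buff)
-- ===== SOURCE B (Python) =====
-- def bitVectorToStr(sig, val, width, vld_mask):
--     # low-to-high pass shifting the operands themselves, result built back-to-front
--     out = []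
--     v = val
--     m = vld_mask
--     for _ in range(width):
--         if m % 2 == 0:
--             out.append('X')
--         elif v % 2:
--             out.append('1')
--         else:
--             out.append('0')
--         v //= 2
--         m //= 2
--     return ''.join(reversed(out))
-- ===== Notes on version B (the rewrite author's own statement) =====
-- stated objective: faster
-- what changed: instead of indexing bits high-to-low with a fresh mask 1<<i and a full-width bitwise AND each iteration, B shifts the operands themselves right (v//=2, m//=2), reads each bit low-to-high via %2, and builds the string back-to-front with a final reverse
import Mathlib
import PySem

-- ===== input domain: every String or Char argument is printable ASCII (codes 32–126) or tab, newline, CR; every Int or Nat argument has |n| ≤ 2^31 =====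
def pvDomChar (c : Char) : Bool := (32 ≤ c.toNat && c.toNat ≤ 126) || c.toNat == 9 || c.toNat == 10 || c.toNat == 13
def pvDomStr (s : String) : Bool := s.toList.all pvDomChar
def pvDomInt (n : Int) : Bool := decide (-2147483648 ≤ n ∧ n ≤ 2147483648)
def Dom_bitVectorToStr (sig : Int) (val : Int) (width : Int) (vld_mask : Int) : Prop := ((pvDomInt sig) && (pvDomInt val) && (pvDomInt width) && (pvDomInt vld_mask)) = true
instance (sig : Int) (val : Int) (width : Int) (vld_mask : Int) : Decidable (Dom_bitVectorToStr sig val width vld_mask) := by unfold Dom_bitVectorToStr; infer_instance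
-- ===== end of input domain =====

-- B replaces A's high-to-low masked bit tests (1 << i, bitwise AND) by a low-to-high pass that
-- shifts the operands themselves (v //= 2, m //= 2) and reverses the collected characters at the end.

-- ===== PORT A =====
def bitVectorToStr (sig : Int) (val : Int) (width : Int) (vld_mask : Int) : String :=
  let buff : List String :=
    (PySem.List.pyRange (width - 1) (-1) (-1)).foldl
      (fun buff i =>
        -- every i produced by this range satisfies 0 ≤ i, so `1 << i` is `1 <<< i.toNat`
        let mask : Int := 1 <<< i.toNat
        let b := PySem.Int.band val mask
        let s := if PySem.Int.band vld_mask mask ≠ 0 then (if b ≠ 0 then "1" else "0") else "X"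
        buff ++ [s]) []
  PySem.Str.join "" buff

-- ===== PORT B =====
-- the `for _ in range(width)` loop of Source B: `range(width)` runs max(width,0) = width.toNat times
def bvAltLoop : Nat → List String → Int → Int → List String
  | 0, out, _, _ => out
  | n + 1, out, v, m =>
      bvAltLoop n
        (out ++ [if PySem.Int.mod m 2 = 0 then "X"
                 else if PySem.Int.mod v 2 ≠ 0 then "1" else "0"])
        (PySem.Int.floordiv v 2) (PySem.Int.floordiv m 2)

def bitVectorToStr_alt (sig : Int) (val : Int) (width : Int) (vld_mask : Int) : String :=
  PySem.Str.join "" (bvAltLoop width.toNat [] val vld_mask).reverse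

-- ===== PRECONDITION & SPEC =====
def Spec_bitVectorToStr (sig : Int) (val : Int) (width : Int) (vld_mask : Int) (out : String) : Prop := out = bitVectorToStr_alt sig val width vld_mask
instance (sig : Int) (val : Int) (width : Int) (vld_mask : Int) (out : String) : Decidable (Spec_bitVectorToStr sig val width vld_mask out) := by unfold Spec_bitVectorToStr; infer_instance

-- ===== CLAIM (what is proved, stated in full; the proofs are below) =====
def Claim_equal_bitVectorToStr : Prop := ∀ (sig : Int) (val : Int) (width : Int) (vld_mask : Int), Dom_bitVectorToStr sig val width vld_mask → Spec_bitVectorToStr sig val width vld_mask (bitVectorToStr sig val width vld_mask)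

-- ===== LEMMAS AND PROOFS =====

-- the character both programs emit for bit position j
def bitChar (j : Nat) (v m : Int) : String :=
  if PySem.Int.band m (2 ^ j) ≠ 0 then (if PySem.Int.band v (2 ^ j) ≠ 0 then "1" else "0") else "X"

-- bit k+1 of v is bit k of v // 2
theorem band_pow_succ_ne (k : Nat) (v : Int) :
    (PySem.Int.band v (2 ^ (k + 1)) ≠ 0) ↔ (PySem.Int.band (PySem.Int.floordiv v 2) (2 ^ k) ≠ 0) := by
  rw [PySem.Int.floordiv_eq_ediv_of_pos (by omega)]
  have e1 : ((2:Int) ^ (k+1)).toNat = 2 ^ (k+1) := by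
    have : ((2:Int)^(k+1)) = ((2^(k+1) : Nat) : Int) := by push_cast; ring
    rw [this, Int.toNat_natCast]
  have e2 : ((2:Int) ^ k).toNat = 2 ^ k := by
    have : ((2:Int)^k) = ((2^k : Nat) : Int) := by push_cast; ring
    rw [this, Int.toNat_natCast]
  by_cases hv : 0 ≤ v
  · have hv2 : 0 ≤ v / 2 := Int.ediv_nonneg hv (by omega)
    simp only [PySem.Int.band, hv, hv2, if_true, if_pos (show (0:Int) ≤ 2 ^ (k+1) by positivity),
      if_pos (show (0:Int) ≤ 2 ^ k by positivity)]
    have h1 : (v / 2).toNat = v.toNat / 2 := by omega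
    rw [h1, e1, e2, Nat.and_two_pow, Nat.and_two_pow, ← Nat.testBit_succ]
    rcases Nat.testBit v.toNat (k+1) with _ | _ <;> simp
  · replace hv : v < 0 := by omega
    have hv2 : ¬ (0 ≤ v / 2) := by omega
    simp only [PySem.Int.band, if_neg (by omega : ¬ (0 ≤ v)), hv2, if_false,
      if_pos (show (0:Int) ≤ 2 ^ (k+1) by positivity), if_pos (show (0:Int) ≤ 2 ^ k by positivity)]
    have hm : (-(v / 2) - 1).toNat = (-v - 1).toNat / 2 := by omega
    rw [hm, e1, e2, Nat.and_comm, Nat.and_comm (2^k), Nat.and_two_pow, Nat.and_two_pow,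
      ← Nat.testBit_succ]
    rcases Nat.testBit (-v - 1).toNat (k+1) with _ | _ <;> simp

theorem bitChar_succ (k : Nat) (v m : Int) :
    bitChar (k + 1) v m = bitChar k (PySem.Int.floordiv v 2) (PySem.Int.floordiv m 2) := by
  simp only [bitChar, band_pow_succ_ne]

theorem bitChar_zero (v m : Int) :
    bitChar 0 v m =
      (if PySem.Int.mod m 2 = 0 then "X" else if PySem.Int.mod v 2 ≠ 0 then "1" else "0") := by
  simp only [bitChar, pow_zero, PySem.Int.band_one,
    PySem.Int.mod_eq_emod_of_pos (show (0:Int) < 2 by omega)]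
  by_cases hm : m % 2 = 0 <;> by_cases hv : v % 2 = 0 <;> simp [hm, hv]

theorem bvAltLoop_acc (n : Nat) (out : List String) (v m : Int) :
    bvAltLoop n out v m = out ++ bvAltLoop n [] v m := by
  induction n generalizing out v m with
  | zero => simp [bvAltLoop]
  | succ n ih =>
      rw [bvAltLoop, bvAltLoop, ih, ih ([] ++ _)]
      simp

theorem bvAltLoop_eq_map (n : Nat) (v m : Int) :
    bvAltLoop n [] v m = List.map (fun k => bitChar k v m) (List.range n) := by
  induction n generalizing v m with
  | zero => simp [bvAltLoop]
  | succ n ih =>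
      rw [bvAltLoop, bvAltLoop_acc, ih, List.range_succ_eq_map]
      simp only [List.nil_append, List.map_cons, List.map_map, List.singleton_append,
        bitChar_zero]
      congr 1
      apply List.map_congr_left
      intro k _
      simp [Function.comp, bitChar_succ]

-- reversing a map over range flips the index
theorem rev_map_range {α : Type} (f : Nat → α) (n : Nat) :
    (List.map f (List.range n)).reverse = List.map (fun k => f (n - 1 - k)) (List.range n) := by
  induction n with
  | zero => simp
  | succ n ih =>
      conv_lhs => rw [List.range_succ]
      conv_rhs => rw [List.range_succ_eq_map]
      simp only [List.map_append, List.map_cons, List.map_nil, List.reverse_append,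
        List.reverse_cons, List.reverse_nil, List.nil_append, List.map_map]
      rw [ih]
      simp only [List.singleton_append, Nat.add_sub_cancel, Nat.sub_zero]
      congr 1
      apply List.map_congr_left
      intro k hk
      simp only [Function.comp, Nat.succ_eq_add_one]
      congr 1
      omega

-- range(width-1, -1, -1) = [width-1, width-2, …, 0]
theorem pyRange_countdown (width : Int) :
    PySem.List.pyRange (width - 1) (-1) (-1) =
      List.map (fun k : Nat => (width - 1) - (k : Int)) (List.range width.toNat) := by
  simp only [PySem.List.pyRange]
  norm_num
  by_cases h : 0 < width
  · rw [if_pos h]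
    apply List.map_congr_left
    intro k _
    ring
  · rw [if_neg h]
    have h0 : width.toNat = 0 := by omega
    simp [h0]

theorem bitVectorToStr_eq (sig val width vld_mask : Int) :
    bitVectorToStr sig val width vld_mask = bitVectorToStr_alt sig val width vld_mask := by
  simp only [bitVectorToStr, bitVectorToStr_alt]
  rw [PySem.List.foldl_append_singleton_eq_map, pyRange_countdown, List.nil_append,
    bvAltLoop_eq_map, rev_map_range, List.map_map]
  congr 1
  apply List.map_congr_left
  intro k hk
  rw [List.mem_range] at hk
  have h1 : ((width - 1 - (k : Int))).toNat = width.toNat - 1 - k := by omega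
  simp only [Function.comp, h1, bitChar, Nat.one_shiftLeft]
  push_cast
  rfl

-- ===== VERDICT (by name: the statement is the Claim_ definition above) =====
theorem bitVectorToStr_spec : Claim_equal_bitVectorToStr := by
  intro sig val width vld_mask _
  exact bitVectorToStr_eq sig val width vld_mask
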